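-- pv_equiv track=rewrite | github.com/czhang-fm/dfa-learning-experiment | dfa-compatible-merge.py | check_comp
-- ===== SOURCE A (Python) =====
-- def check_comp(s1, s2, data, comp, incomp):
--     if s2 in comp[s1]: return True
--     elif s2 in incomp[s1]: return False
--     # if not in the caches
--     if data[s1] != -1 and data[s2] != -1 and data[s1] != data[s2]: # incompatiblity at current states
--         incomp[s1].add(s2)
--         incomp[s2].add(s1)
--         return False
--     elif not(s1+'0' in data) or not(s2+'0' in data): # left '0' compatible, checking right '1'
--         if not(s1+'1' in data) or not(s2+'1' in data):
--             comp[s1].add(s2)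
--             comp[s2].add(s1)
--             return True
--         elif check_comp(s1+'1', s2+'1', data, comp, incomp):
--             comp[s1].add(s2)
--             comp[s2].add(s1)
--             return True
--         else:
--             incomp[s1].add(s2)
--             incomp[s2].add(s1)
--             return False
--     elif check_comp(s1+'0', s2+'0', data, comp, incomp): # checking left '0' compatibility first, if true, check right '1'
--         if not(s1+'1' in data) or not(s2+'1' in data):
--             comp[s1].add(s2)
--             comp[s2].add(s1)
--             return True
--         elif check_comp(s1+'1', s2+'1', data, comp, incomp):
--             comp[s1].add(s2)
--             comp[s2].add(s1)
--             return True
--         else: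
--             incomp[s1].add(s2)
--             incomp[s2].add(s1)
--             return False
--     else: # left '0' incompatiblitly
--         incomp[s1].add(s2)
--         incomp[s2].add(s1)
--         return False
-- ===== SOURCE B (Python) =====
-- def check_comp(s1, s2, data, comp, incomp):
--     # Iterative worklist traversal; reads the caches but performs NO cache
--     # mutation (return value only; no pair of states repeats within one call,
--     # so A's memoization writes can never influence its own result).
--     stack = [(s1, s2)]
--     while stack:
--         a, b = stack.pop()
--         if b in comp[a]:
--             continue
--         if b in incomp[a]:
--             return False
--         if data[a] != -1 and data[b] != -1 and data[a] != data[b]: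
--             return False
--         for c in '01':
--             if a + c in data and b + c in data:
--                 stack.append((a + c, b + c))
--     return True
-- ===== Notes on version B (the rewrite author's own statement) =====
-- stated objective: simpler
-- what changed: A's memoized recursion with six duplicated symmetric cache write-backs is replaced by an iterative worklist (explicit stack) traversal of the reachable state pairs that performs no cache mutation at all — correct because no state pair repeats within one call, so A's own writes can never influence its own reads; caller-visible difference: B does not add entries to comp/incomp (return value is identical).
import Mathlib
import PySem

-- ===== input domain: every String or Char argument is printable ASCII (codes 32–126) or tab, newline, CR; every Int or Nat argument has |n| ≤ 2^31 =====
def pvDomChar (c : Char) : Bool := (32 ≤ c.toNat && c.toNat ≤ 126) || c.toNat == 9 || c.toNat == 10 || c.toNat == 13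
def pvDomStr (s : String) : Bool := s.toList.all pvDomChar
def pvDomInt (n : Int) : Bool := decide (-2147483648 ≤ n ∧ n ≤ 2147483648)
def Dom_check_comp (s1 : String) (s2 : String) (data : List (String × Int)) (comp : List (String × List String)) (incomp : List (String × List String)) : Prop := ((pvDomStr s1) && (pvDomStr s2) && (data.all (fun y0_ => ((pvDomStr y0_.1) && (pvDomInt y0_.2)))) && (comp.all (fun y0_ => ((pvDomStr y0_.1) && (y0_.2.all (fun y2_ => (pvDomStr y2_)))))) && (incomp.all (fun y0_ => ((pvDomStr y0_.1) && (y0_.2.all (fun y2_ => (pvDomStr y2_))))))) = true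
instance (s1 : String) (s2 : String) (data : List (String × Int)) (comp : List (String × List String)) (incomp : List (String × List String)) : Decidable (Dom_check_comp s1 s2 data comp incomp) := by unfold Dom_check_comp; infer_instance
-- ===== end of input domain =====

-- B replaces A's memoized recursion (with its six duplicated symmetric cache write-backs) by an
-- iterative worklist traversal of the reachable state pairs that performs NO cache mutation
-- (objective: simpler). A mutates comp/incomp in place; B does not — the equivalence proved
-- here is about the RETURN value only (within one call no state pair repeats, so A's own
-- writes never influence its own reads).

-- symmetric cache write of A: cache[a].add(b); cache[b].add(a)
def pvAddPair (d : PySem.Dict String (List String)) (a b : String) : PySem.Dict String (List String) :=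
  let d := d.insert a (PySem.Set.add (d.getD a []) b)
  d.insert b (PySem.Set.add (d.getD b []) a)

-- ===== PORT A =====
-- literal transliteration of A; recursion depth is bounded by the number of data keys (each
-- recursive call's state is a strictly longer key of data), so fuel = data.size + 1 is never
-- exhausted on inputs Pre_ admits; caches are threaded as state since Python mutates them.
def pvCheckA (data : PySem.Dict String Int) :
    Nat → String → String → PySem.Dict String (List String) → PySem.Dict String (List String) →
    Bool × PySem.Dict String (List String) × PySem.Dict String (List String)
  | 0, _, _, comp, incomp => (false, comp, incomp)
  | fuel + 1, s1, s2, comp, incomp =>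
    if PySem.Set.contains (comp.getD s1 []) s2 then (true, comp, incomp)
    else if PySem.Set.contains (incomp.getD s1 []) s2 then (false, comp, incomp)
    else if data.getD s1 (-1) ≠ -1 ∧ data.getD s2 (-1) ≠ -1 ∧ data.getD s1 (-1) ≠ data.getD s2 (-1) then
      (false, comp, pvAddPair incomp s1 s2)
    else if ¬ data.contains (s1 ++ "0") = true ∨ ¬ data.contains (s2 ++ "0") = true then
      if ¬ data.contains (s1 ++ "1") = true ∨ ¬ data.contains (s2 ++ "1") = true then
        (true, pvAddPair comp s1 s2, incomp)
      else
        let r1 := pvCheckA data fuel (s1 ++ "1") (s2 ++ "1") comp incomp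
        if r1.1 then (true, pvAddPair r1.2.1 s1 s2, r1.2.2)
        else (false, r1.2.1, pvAddPair r1.2.2 s1 s2)
    else
      let r0 := pvCheckA data fuel (s1 ++ "0") (s2 ++ "0") comp incomp
      if r0.1 then
        if ¬ data.contains (s1 ++ "1") = true ∨ ¬ data.contains (s2 ++ "1") = true then
          (true, pvAddPair r0.2.1 s1 s2, r0.2.2)
        else
          let r1 := pvCheckA data fuel (s1 ++ "1") (s2 ++ "1") r0.2.1 r0.2.2
          if r1.1 then (true, pvAddPair r1.2.1 s1 s2, r1.2.2)
          else (false, r1.2.1, pvAddPair r1.2.2 s1 s2)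
      else (false, r0.2.1, pvAddPair r0.2.2 s1 s2)

def check_comp (s1 : String) (s2 : String) (data : List (String × Int)) (comp : List (String × List String)) (incomp : List (String × List String)) : Bool :=
  (pvCheckA (PySem.Dict.ofList data) (data.length + 1) s1 s2
    (PySem.Dict.ofList comp) (PySem.Dict.ofList incomp)).1

-- ===== PORT B =====
-- literal transliteration of B's while-loop over an explicit stack of pairs; the Nat carried
-- with each stack entry is fuel only (a totality device, never exhausted on admitted inputs:
-- a pushed pair's first component is a strictly longer key of data than its parent's, so the
-- expansion depth is at most the number of data keys); Python pushes '0' then '1' and pops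
-- the top of the stack, so the '1'-child is prepended first.
def pvCheckB (data : PySem.Dict String Int) (c : PySem.Dict String (List String)) (i : PySem.Dict String (List String)) :
    List (Nat × String × String) → Bool
  | [] => true
  | (0, _, _) :: _ => false
  | (f + 1, a, b) :: st =>
    if PySem.Set.contains (c.getD a []) b then pvCheckB data c i st
    else if PySem.Set.contains (i.getD a []) b then false
    else if data.getD a (-1) ≠ -1 ∧ data.getD b (-1) ≠ -1 ∧ data.getD a (-1) ≠ data.getD b (-1) then false
    else pvCheckB data c i
      ((if data.contains (a ++ "1") && data.contains (b ++ "1") then [(f, a ++ "1", b ++ "1")] else [])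
        ++ ((if data.contains (a ++ "0") && data.contains (b ++ "0") then [(f, a ++ "0", b ++ "0")] else [])
        ++ st))
termination_by st => (st.map (fun e => 3 ^ e.1)).sum
decreasing_by
  all_goals
    simp only [List.map_append, List.map_cons, List.sum_append, List.sum_cons]
    have h3 : 0 < 3 ^ f := pow_pos (by omega) f
    have hp : 3 ^ (f + 1) = 3 ^ f * 3 := pow_succ 3 f
    first
      | omega
      | (split_ifs <;> simp only [List.map_cons, List.sum_cons, List.map_nil, List.sum_nil] <;> omega)

def check_comp_alt (s1 : String) (s2 : String) (data : List (String × Int)) (comp : List (String × List String)) (incomp : List (String × List String)) : Bool :=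
  pvCheckB (PySem.Dict.ofList data) (PySem.Dict.ofList comp) (PySem.Dict.ofList incomp)
    [(data.length + 1, s1, s2)]

-- ===== PRECONDITION & SPEC =====
-- Pre_ excludes exactly the inputs on which Python A raises KeyError: the root lookups
-- (comp[s1], then incomp[s1], then data[s1]/data[s2] unless a cache answers first) must succeed,
-- and every state pair the traversal could reach (s1++w, s2++w for a binary suffix w with both
-- extensions keys of data) must be a key of both caches.
def pvBinExt (s t : String) : Bool :=
  (t.toList.take s.toList.length == s.toList)
    && (t.toList.drop s.toList.length).all (fun c => c == '0' || c == '1')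
    && decide (s.toList.length < t.toList.length)
def pvInCaches (comp : List (String × List String)) (incomp : List (String × List String)) (s : String) : Prop :=
  (comp.lookup s).isSome = true ∧ (incomp.lookup s).isSome = true
def Pre_check_comp (s1 : String) (s2 : String) (data : List (String × Int)) (comp : List (String × List String)) (incomp : List (String × List String)) : Prop :=
  ((comp.lookup s1).isSome = true
    ∧ (s2 ∈ ((comp.lookup s1).getD [])
        ∨ ((incomp.lookup s1).isSome = true
            ∧ (s2 ∈ ((incomp.lookup s1).getD [])
                ∨ ((data.lookup s1).isSome = true ∧ (data.lookup s2).isSome = true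
                    ∧ (comp.lookup s2).isSome = true ∧ (incomp.lookup s2).isSome = true)))))
  ∧ (∀ p1 ∈ data, ∀ p2 ∈ data,
      (pvBinExt s1 p1.1 && pvBinExt s2 p2.1
        && (p1.1.toList.drop s1.toList.length == p2.1.toList.drop s2.toList.length)) = true →
      pvInCaches comp incomp p1.1 ∧ pvInCaches comp incomp p2.1)
instance (s1 : String) (s2 : String) (data : List (String × Int)) (comp : List (String × List String)) (incomp : List (String × List String)) : Decidable (Pre_check_comp s1 s2 data comp incomp) := by unfold Pre_check_comp pvInCaches; infer_instance

def pvWitness_check_comp : String × String × (List (String × Int)) × (List (String × List String)) × (List (String × List String)) :=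
  ("", "0", [("", (-1 : Int)), ("0", 1)], [("", []), ("0", [])], [("", []), ("0", [])])

def Spec_check_comp (s1 : String) (s2 : String) (data : List (String × Int)) (comp : List (String × List String)) (incomp : List (String × List String)) (out : Bool) : Prop := out = check_comp_alt s1 s2 data comp incomp
instance (s1 : String) (s2 : String) (data : List (String × Int)) (comp : List (String × List String)) (incomp : List (String × List String)) (out : Bool) : Decidable (Spec_check_comp s1 s2 data comp incomp out) := by unfold Spec_check_comp; infer_instance

-- ===== CLAIM (what is proved, stated in full; the proofs are below) =====
def Claim_equal_check_comp : Prop := ∀ (s1 : String) (s2 : String) (data : List (String × Int)) (comp : List (String × List String)) (incomp : List (String × List String)), Dom_check_comp s1 s2 data comp incomp → Pre_check_comp s1 s2 data comp incomp → Spec_check_comp s1 s2 data comp incomp (check_comp s1 s2 data comp incomp)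

-- ===== LEMMAS AND PROOFS =====

-- membership test 'y in cache[x]' (with a missing key read as the empty set)
def pvMemb (d : PySem.Dict String (List String)) (x y : String) : Bool :=
  PySem.Set.contains (d.getD x []) y

-- the common pure value both programs compute: compatibility read off the INITIAL caches
def pvPure (data : PySem.Dict String Int) (c : PySem.Dict String (List String)) (i : PySem.Dict String (List String)) :
    Nat → String → String → Bool
  | 0, _, _ => false
  | f + 1, a, b =>
    if pvMemb c a b then true
    else if pvMemb i a b then false
    else if data.getD a (-1) ≠ -1 ∧ data.getD b (-1) ≠ -1 ∧ data.getD a (-1) ≠ data.getD b (-1) then false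
    else
      (if data.contains (a ++ "0") && data.contains (b ++ "0") then pvPure data c i f (a ++ "0") (b ++ "0") else true)
        && (if data.contains (a ++ "1") && data.contains (b ++ "1") then pvPure data c i f (a ++ "1") (b ++ "1") else true)

-- pairs A's call (s1,s2) may write to the caches: (s1++w, s2++w) in either orientation
def pvQ (s1 s2 x y : String) : Prop :=
  ∃ w : String, (x = s1 ++ w ∧ y = s2 ++ w) ∨ (x = s2 ++ w ∧ y = s1 ++ w)

theorem pvQ_self (s1 s2 : String) : pvQ s1 s2 s1 s2 :=
  ⟨"", Or.inl ⟨String.append_empty.symm, String.append_empty.symm⟩⟩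

theorem pvQ_shift (s1 s2 t x y : String) (h : pvQ (s1 ++ t) (s2 ++ t) x y) : pvQ s1 s2 x y := by
  obtain ⟨w, h | h⟩ := h
  · exact ⟨t ++ w, Or.inl (by rw [h.1, h.2, String.append_assoc, String.append_assoc]; exact ⟨rfl, rfl⟩)⟩
  · exact ⟨t ++ w, Or.inr (by rw [h.1, h.2, String.append_assoc, String.append_assoc]; exact ⟨rfl, rfl⟩)⟩

-- the '1'-subtree never reads a pair the '0'-subtree may have written
theorem pvQ_cross (s1 s2 w : String) :
    ¬ pvQ (s1 ++ "0") (s2 ++ "0") (s1 ++ "1" ++ w) (s2 ++ "1" ++ w) := by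
  rintro ⟨u, ⟨h1, h2⟩ | ⟨h1, h2⟩⟩
  · have e1 := congrArg String.toList h1
    simp only [String.toList_append, List.append_assoc,
      show ("1" : String).toList = ['1'] from rfl, show ("0" : String).toList = ['0'] from rfl] at e1
    have h := List.append_cancel_left e1
    simp at h
  · have e1 := congrArg String.toList h1
    have e2 := congrArg String.toList h2
    simp only [String.toList_append, List.append_assoc,
      show ("1" : String).toList = ['1'] from rfl, show ("0" : String).toList = ['0'] from rfl,
      List.singleton_append] at e1 e2
    have l1 := congrArg List.length e1
    have l2 := congrArg List.length e2
    simp only [List.length_append, List.length_cons] at l1 l2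
    have hlen : s1.toList.length = s2.toList.length := by omega
    have := (List.append_inj e1 hlen).2
    simp at this

-- pvAddPair changes membership only at the written pair (in its two orientations)
theorem pvMemb_addPair_of_ne (d : PySem.Dict String (List String)) (a b x y : String)
    (h : ¬ ((x = a ∧ y = b) ∨ (x = b ∧ y = a))) :
    pvMemb (pvAddPair d a b) x y = pvMemb d x y := by
  have h1 : x = a → y ≠ b := fun hx hy => h (Or.inl ⟨hx, hy⟩)
  have h2 : x = b → y ≠ a := fun hx hy => h (Or.inr ⟨hx, hy⟩)
  unfold pvMemb pvAddPair
  rw [Bool.eq_iff_iff, PySem.Set.contains_iff, PySem.Set.contains_iff]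
  by_cases hxb : x = b <;> by_cases hxa : x = a
  · have hab : a = b := hxa.symm.trans hxb
    have hya := h2 hxb
    subst hxa; subst hab
    rw [PySem.Dict.getD_insert_self, PySem.Set.mem_add, PySem.Dict.getD_insert_self,
      PySem.Set.mem_add]
    simp [hya]
  · have hya := h2 hxb
    subst hxb
    rw [PySem.Dict.getD_insert_self, PySem.Set.mem_add,
      PySem.Dict.getD_insert_of_ne _ _ _ hxa]
    simp [hya]
  · have hyb := h1 hxa
    subst hxa
    have hab : b ≠ x := fun hc => hxb hc.symm
    rw [PySem.Dict.getD_insert_of_ne _ _ _ hab.symm, PySem.Dict.getD_insert_self,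
      PySem.Set.mem_add]
    simp [hyb]
  · rw [PySem.Dict.getD_insert_of_ne _ _ _ hxb, PySem.Dict.getD_insert_of_ne _ _ _ hxa]

-- pvPure reads the caches only at pairs (a++w, b++w)
theorem pvPure_congr (data : PySem.Dict String Int) :
    ∀ (f : Nat) (a b : String) (c c' i i' : PySem.Dict String (List String)),
      (∀ w, pvMemb c (a ++ w) (b ++ w) = pvMemb c' (a ++ w) (b ++ w)) →
      (∀ w, pvMemb i (a ++ w) (b ++ w) = pvMemb i' (a ++ w) (b ++ w)) →
      pvPure data c i f a b = pvPure data c' i' f a b := by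
  intro f
  induction f with
  | zero => intro a b c c' i i' _ _; rfl
  | succ f ih =>
    intro a b c c' i i' hc hi
    have hc0 := hc ""
    have hi0 := hi ""
    rw [String.append_empty, String.append_empty] at hc0 hi0
    simp only [pvPure, hc0, hi0]
    have r0 := ih (a ++ "0") (b ++ "0") c c' i i'
      (fun w => by rw [String.append_assoc, String.append_assoc]; exact hc ("0" ++ w))
      (fun w => by rw [String.append_assoc, String.append_assoc]; exact hi ("0" ++ w))
    have r1 := ih (a ++ "1") (b ++ "1") c c' i i'
      (fun w => by rw [String.append_assoc, String.append_assoc]; exact hc ("1" ++ w))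
      (fun w => by rw [String.append_assoc, String.append_assoc]; exact hi ("1" ++ w))
    rw [r0, r1]

-- MAIN LEMMA on A: its value is the pure value read off its input caches, and its cache
-- writes are confined to pairs (s1++w, s2++w) (in either orientation), so they can never
-- be read back within the same call
theorem pvCheckA_pure (data : PySem.Dict String Int) :
    ∀ (f : Nat) (s1 s2 : String) (c i : PySem.Dict String (List String)),
      (pvCheckA data f s1 s2 c i).1 = pvPure data c i f s1 s2
      ∧ (∀ x y, ¬ pvQ s1 s2 x y → pvMemb (pvCheckA data f s1 s2 c i).2.1 x y = pvMemb c x y)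
      ∧ (∀ x y, ¬ pvQ s1 s2 x y → pvMemb (pvCheckA data f s1 s2 c i).2.2 x y = pvMemb i x y) := by
  intro f
  induction f with
  | zero => intro s1 s2 c i; exact ⟨rfl, fun _ _ _ => rfl, fun _ _ _ => rfl⟩
  | succ f ih =>
    intro s1 s2 c i
    have hAdd : ∀ (d : PySem.Dict String (List String)) (x y : String), ¬ pvQ s1 s2 x y →
        pvMemb (pvAddPair d s1 s2) x y = pvMemb d x y := by
      intro d x y hq
      refine pvMemb_addPair_of_ne d s1 s2 x y ?_
      rintro (⟨hx, hy⟩ | ⟨hx, hy⟩)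
      · exact hq (by rw [hx, hy]; exact pvQ_self s1 s2)
      · exact hq ⟨"", Or.inr ⟨by rw [hx, String.append_empty], by rw [hy, String.append_empty]⟩⟩
    have hQ0 : ∀ x y, ¬ pvQ s1 s2 x y → ¬ pvQ (s1 ++ "0") (s2 ++ "0") x y :=
      fun x y hq hq' => hq (pvQ_shift s1 s2 "0" x y hq')
    have hQ1 : ∀ x y, ¬ pvQ s1 s2 x y → ¬ pvQ (s1 ++ "1") (s2 ++ "1") x y :=
      fun x y hq hq' => hq (pvQ_shift s1 s2 "1" x y hq')
    simp only [pvCheckA, pvPure]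
    by_cases h1 : PySem.Set.contains (c.getD s1 []) s2 = true
    · rw [if_pos h1, if_pos (show pvMemb c s1 s2 = true from h1)]
      exact ⟨rfl, fun _ _ _ => rfl, fun _ _ _ => rfl⟩
    · rw [if_neg h1, if_neg (show ¬ pvMemb c s1 s2 = true from h1)]
      by_cases h2 : PySem.Set.contains (i.getD s1 []) s2 = true
      · rw [if_pos h2, if_pos (show pvMemb i s1 s2 = true from h2)]
        exact ⟨rfl, fun _ _ _ => rfl, fun _ _ _ => rfl⟩
      · rw [if_neg h2, if_neg (show ¬ pvMemb i s1 s2 = true from h2)]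
        by_cases hconf : data.getD s1 (-1) ≠ -1 ∧ data.getD s2 (-1) ≠ -1 ∧ data.getD s1 (-1) ≠ data.getD s2 (-1)
        · rw [if_pos hconf, if_pos hconf]
          exact ⟨rfl, fun _ _ _ => rfl, fun x y hq => hAdd i x y hq⟩
        · rw [if_neg hconf, if_neg hconf]
          by_cases h0b : data.contains (s1 ++ "0") = true ∧ data.contains (s2 ++ "0") = true
          · have hg0 : ¬ (¬ data.contains (s1 ++ "0") = true ∨ ¬ data.contains (s2 ++ "0") = true) := by tauto
            have hb0 : (data.contains (s1 ++ "0") && data.contains (s2 ++ "0")) = true := by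
              rw [h0b.1, h0b.2]; rfl
            rw [if_neg hg0, if_pos hb0]
            obtain ⟨v0, c0conf, i0conf⟩ := ih (s1 ++ "0") (s2 ++ "0") c i
            rcases hr0 : pvCheckA data f (s1 ++ "0") (s2 ++ "0") c i with ⟨b0, c0, i0⟩
            simp only [hr0] at v0 c0conf i0conf ⊢
            have hc0cong : ∀ w, pvMemb c0 ((s1 ++ "1") ++ w) ((s2 ++ "1") ++ w) = pvMemb c ((s1 ++ "1") ++ w) ((s2 ++ "1") ++ w) :=
              fun w => c0conf _ _ (pvQ_cross s1 s2 w)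
            have hi0cong : ∀ w, pvMemb i0 ((s1 ++ "1") ++ w) ((s2 ++ "1") ++ w) = pvMemb i ((s1 ++ "1") ++ w) ((s2 ++ "1") ++ w) :=
              fun w => i0conf _ _ (pvQ_cross s1 s2 w)
            cases b0 with
            | false =>
              rw [if_neg Bool.false_ne_true, ← v0, Bool.false_and]
              exact ⟨rfl, fun x y hq => c0conf x y (hQ0 x y hq),
                fun x y hq => by
                  show pvMemb (pvAddPair i0 s1 s2) x y = pvMemb i x y
                  rw [hAdd i0 x y hq]; exact i0conf x y (hQ0 x y hq)⟩
            | true =>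
              rw [if_pos rfl, ← v0, Bool.true_and]
              by_cases h1b : data.contains (s1 ++ "1") = true ∧ data.contains (s2 ++ "1") = true
              · have hg1 : ¬ (¬ data.contains (s1 ++ "1") = true ∨ ¬ data.contains (s2 ++ "1") = true) := by tauto
                have hb1 : (data.contains (s1 ++ "1") && data.contains (s2 ++ "1")) = true := by
                  rw [h1b.1, h1b.2]; rfl
                rw [if_neg hg1, if_pos hb1]
                obtain ⟨v1, c1conf, i1conf⟩ := ih (s1 ++ "1") (s2 ++ "1") c0 i0
                rcases hr1 : pvCheckA data f (s1 ++ "1") (s2 ++ "1") c0 i0 with ⟨b1, c1, i1⟩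
                simp only [hr1] at v1 c1conf i1conf ⊢
                have hcong := pvPure_congr data f (s1 ++ "1") (s2 ++ "1") c0 c i0 i hc0cong hi0cong
                have hv1' : pvPure data c i f (s1 ++ "1") (s2 ++ "1") = b1 := by
                  rw [← hcong]; exact v1.symm
                cases b1 with
                | true =>
                  rw [if_pos rfl, hv1']
                  refine ⟨rfl, fun x y hq => ?_, fun x y hq => ?_⟩
                  · show pvMemb (pvAddPair c1 s1 s2) x y = pvMemb c x y
                    rw [hAdd c1 x y hq, c1conf x y (hQ1 x y hq)]
                    exact c0conf x y (hQ0 x y hq)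
                  · show pvMemb i1 x y = pvMemb i x y
                    rw [i1conf x y (hQ1 x y hq)]
                    exact i0conf x y (hQ0 x y hq)
                | false =>
                  rw [if_neg Bool.false_ne_true, hv1']
                  refine ⟨rfl, fun x y hq => ?_, fun x y hq => ?_⟩
                  · show pvMemb c1 x y = pvMemb c x y
                    rw [c1conf x y (hQ1 x y hq)]
                    exact c0conf x y (hQ0 x y hq)
                  · show pvMemb (pvAddPair i1 s1 s2) x y = pvMemb i x y
                    rw [hAdd i1 x y hq, i1conf x y (hQ1 x y hq)]
                    exact i0conf x y (hQ0 x y hq)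
              · have hg1 : (¬ data.contains (s1 ++ "1") = true ∨ ¬ data.contains (s2 ++ "1") = true) := by tauto
                have hb1' : ¬ (data.contains (s1 ++ "1") && data.contains (s2 ++ "1")) = true := by
                  cases hc1 : data.contains (s1 ++ "1") <;> cases hc2 : data.contains (s2 ++ "1") <;> simp_all
                rw [if_pos hg1, if_neg hb1']
                exact ⟨rfl,
                  fun x y hq => by
                    show pvMemb (pvAddPair c0 s1 s2) x y = pvMemb c x y
                    rw [hAdd c0 x y hq]; exact c0conf x y (hQ0 x y hq),
                  fun x y hq => i0conf x y (hQ0 x y hq)⟩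
          · have hg0 : (¬ data.contains (s1 ++ "0") = true ∨ ¬ data.contains (s2 ++ "0") = true) := by tauto
            have hb0' : ¬ (data.contains (s1 ++ "0") && data.contains (s2 ++ "0")) = true := by
              cases hc1 : data.contains (s1 ++ "0") <;> cases hc2 : data.contains (s2 ++ "0") <;> simp_all
            rw [if_pos hg0, if_neg hb0', Bool.true_and]
            by_cases h1b : data.contains (s1 ++ "1") = true ∧ data.contains (s2 ++ "1") = true
            · have hg1 : ¬ (¬ data.contains (s1 ++ "1") = true ∨ ¬ data.contains (s2 ++ "1") = true) := by tauto
              have hb1 : (data.contains (s1 ++ "1") && data.contains (s2 ++ "1")) = true := by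
                rw [h1b.1, h1b.2]; rfl
              rw [if_neg hg1, if_pos hb1]
              obtain ⟨v1, c1conf, i1conf⟩ := ih (s1 ++ "1") (s2 ++ "1") c i
              rcases hr1 : pvCheckA data f (s1 ++ "1") (s2 ++ "1") c i with ⟨b1, c1, i1⟩
              simp only [hr1] at v1 c1conf i1conf ⊢
              cases b1 with
              | true =>
                rw [if_pos rfl, ← v1]
                exact ⟨rfl,
                  fun x y hq => by
                    show pvMemb (pvAddPair c1 s1 s2) x y = pvMemb c x y
                    rw [hAdd c1 x y hq]; exact c1conf x y (hQ1 x y hq),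
                  fun x y hq => i1conf x y (hQ1 x y hq)⟩
              | false =>
                rw [if_neg Bool.false_ne_true, ← v1]
                exact ⟨rfl, fun x y hq => c1conf x y (hQ1 x y hq),
                  fun x y hq => by
                    show pvMemb (pvAddPair i1 s1 s2) x y = pvMemb i x y
                    rw [hAdd i1 x y hq]; exact i1conf x y (hQ1 x y hq)⟩
            · have hg1 : (¬ data.contains (s1 ++ "1") = true ∨ ¬ data.contains (s2 ++ "1") = true) := by tauto
              have hb1' : ¬ (data.contains (s1 ++ "1") && data.contains (s2 ++ "1")) = true := by
                cases hc1 : data.contains (s1 ++ "1") <;> cases hc2 : data.contains (s2 ++ "1") <;> simp_all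
              rw [if_pos hg1, if_neg hb1']
              exact ⟨rfl, fun x y hq => hAdd c x y hq, fun _ _ _ => rfl⟩

-- LEMMA on B: the worklist loop computes the conjunction of the pure values on the stack
theorem pvCheckB_all (data : PySem.Dict String Int) (c i : PySem.Dict String (List String)) :
    ∀ st : List (Nat × String × String),
      pvCheckB data c i st = st.all (fun e => pvPure data c i e.1 e.2.1 e.2.2) := by
  intro st
  induction st using pvCheckB.induct data c i with
  | case1 => simp [pvCheckB]
  | case2 a b st => simp [pvCheckB, pvPure]
  | case3 f a b st h1 ih =>
    simp only [pvCheckB, List.all_cons]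
    rw [if_pos h1, ih]
    simp only [pvPure]
    rw [if_pos (show pvMemb c a b = true from h1), Bool.true_and]
  | case4 f a b st h1 h2 =>
    simp only [pvCheckB, List.all_cons, pvPure]
    rw [if_neg h1, if_pos h2, if_neg (show ¬ pvMemb c a b = true from h1),
      if_pos (show pvMemb i a b = true from h2), Bool.false_and]
  | case5 f a b st h1 h2 h3 =>
    simp only [pvCheckB, List.all_cons, pvPure]
    rw [if_neg h1, if_neg h2, if_pos h3, if_neg (show ¬ pvMemb c a b = true from h1),
      if_neg (show ¬ pvMemb i a b = true from h2), if_pos h3, Bool.false_and]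
  | case6 f a b st h1 h2 h3 ih =>
    simp only [pvCheckB, List.all_cons, pvPure]
    rw [if_neg h1, if_neg h2, if_neg h3, if_neg (show ¬ pvMemb c a b = true from h1),
      if_neg (show ¬ pvMemb i a b = true from h2), if_neg h3]
    simp only [dite_eq_ite] at ih
    rw [ih, List.all_append, List.all_append]
    by_cases hb0 : (data.contains (a ++ "0") && data.contains (b ++ "0")) = true <;>
      by_cases hb1 : (data.contains (a ++ "1") && data.contains (b ++ "1")) = true <;>
        simp [hb0, hb1, Bool.and_comm, Bool.and_assoc, Bool.and_left_comm]

-- ===== VERDICT (by name: the statement is the Claim_ definition above) =====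
theorem check_comp_spec : Claim_equal_check_comp := by
  intro s1 s2 data comp incomp _ _
  unfold Spec_check_comp check_comp check_comp_alt
  rw [(pvCheckA_pure (PySem.Dict.ofList data) (data.length + 1) s1 s2
    (PySem.Dict.ofList comp) (PySem.Dict.ofList incomp)).1,
    pvCheckB_all]
  simp
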